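-- pv_equiv track=rewrite | github.com/Darwin27264/Toronto-TTC-Trip-Planner | get_Stop_Times.py | check_contains
-- ===== SOURCE A (Python) =====
-- def check_contains(sample_route_order, start_stop_id, end_stop_id):
--     """
--     check_contains checks the list of stops that a trip visits and
--     checks if the starting stop and ending stop both appear in the list
--     and in that order respectively. Returns True if these conditions are met
--     and returns False otherwise
--     """
--
--     starting_stop_found = False
--
--     for s in sample_route_order:
--         if s == start_stop_id and end_stop_id in sample_route_order:
--             starting_stop_found = True
--         if starting_stop_found and s == end_stop_id:
--             return True
--     return False
-- ===== SOURCE B (Python) =====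
-- def check_contains(sample_route_order, start_stop_id, end_stop_id):
--     if start_stop_id not in sample_route_order:
--         return False
--     start_index = sample_route_order.index(start_stop_id)
--     return end_stop_id in sample_route_order[start_index:]
-- ===== Notes on version B (the rewrite author's own statement) =====
-- stated objective: simpler
-- what changed: Replaced A's flag-tracking scan (with a repeated 'end in list' membership test inside the loop) by a locate-first-start then probe-the-suffix decomposition: index() plus a membership test on the slice from that index.
import Mathlib
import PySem

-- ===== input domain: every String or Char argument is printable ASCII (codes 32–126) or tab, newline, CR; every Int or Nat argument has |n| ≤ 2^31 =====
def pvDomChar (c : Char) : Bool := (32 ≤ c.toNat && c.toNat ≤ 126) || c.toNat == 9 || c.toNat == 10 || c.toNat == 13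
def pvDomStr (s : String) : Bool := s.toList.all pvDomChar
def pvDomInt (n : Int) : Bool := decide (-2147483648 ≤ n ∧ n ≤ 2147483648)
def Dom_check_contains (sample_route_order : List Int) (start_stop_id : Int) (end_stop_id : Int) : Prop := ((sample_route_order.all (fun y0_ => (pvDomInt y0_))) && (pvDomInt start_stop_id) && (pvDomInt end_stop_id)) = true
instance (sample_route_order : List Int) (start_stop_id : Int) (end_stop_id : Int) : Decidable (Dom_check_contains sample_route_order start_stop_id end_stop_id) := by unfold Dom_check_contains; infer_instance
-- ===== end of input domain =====

-- B replaces A's flag-tracking scan by index()-then-suffix-membership: a simpler locate-then-probe decomposition.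


-- ===== PORT A =====
-- Port of A: the flag-tracking scan, literally (the in-loop membership test included).
def chkLoop (full : List Int) (s e : Int) : List Int → Bool → Bool
  | [], _ => false
  | x :: xs, flag =>
    let flag' := if x = s ∧ e ∈ full then true else flag
    if flag' = true ∧ x = e then true else chkLoop full s e xs flag'

def check_contains (sample_route_order : List Int) (start_stop_id : Int) (end_stop_id : Int) : Bool :=
  chkLoop sample_route_order start_stop_id end_stop_id sample_route_order false


-- ===== PORT B =====
-- Port of B: guard on membership, locate the first start index, probe the suffix slice.
def check_contains_alt (sample_route_order : List Int) (start_stop_id : Int) (end_stop_id : Int) : Bool :=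
  if start_stop_id ∈ sample_route_order then
    let start_index : Nat := (PySem.List.index? sample_route_order start_stop_id).getD 0
    end_stop_id ∈ PySem.List.slice sample_route_order (some (start_index : Int)) none
  else false


-- ===== PRECONDITION & SPEC =====
def Spec_check_contains (sample_route_order : List Int) (start_stop_id : Int) (end_stop_id : Int) (out : Bool) : Prop := out = check_contains_alt sample_route_order start_stop_id end_stop_id
instance (sample_route_order : List Int) (start_stop_id : Int) (end_stop_id : Int) (out : Bool) : Decidable (Spec_check_contains sample_route_order start_stop_id end_stop_id out) := by unfold Spec_check_contains; infer_instance

-- ===== CLAIM (what is proved, stated in full; the proofs are below) =====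
def Claim_equal_check_contains : Prop := ∀ (sample_route_order : List Int) (start_stop_id : Int) (end_stop_id : Int), Dom_check_contains sample_route_order start_stop_id end_stop_id → Spec_check_contains sample_route_order start_stop_id end_stop_id (check_contains sample_route_order start_stop_id end_stop_id)

-- ===== LEMMAS AND PROOFS =====


-- index? returns the first index of a present element.
theorem index?_of_mem (l : List Int) (s : Int) (hs : s ∈ l) :
    PySem.List.index? l s = some (l.idxOf s) := by
  rw [PySem.List.index?_eq_idxOf?]
  induction l with
  | nil => cases hs
  | cons x xs ih =>
    by_cases h : x = s
    · subst h; simp [List.idxOf?_cons, List.idxOf_cons_self]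
    · rcases List.mem_cons.mp hs with h' | h'
      · exact absurd h'.symm h
      · simp [List.idxOf?_cons, h, beq_iff_eq, ih h']

-- chkLoop on any suffix xs, memberships tested against 'full': true iff the flag
-- is already set and e occurs in xs, or e ∈ full and e occurs in xs at or after
-- the first occurrence of s.
theorem chkLoop_eq (full : List Int) (s e : Int) (xs : List Int) (flag : Bool) :
    chkLoop full s e xs flag =
      ((flag && decide (e ∈ xs)) ||
       (decide (e ∈ full) && decide (s ∈ xs) && decide (e ∈ xs.drop (xs.idxOf s)))) := by
  induction xs generalizing flag with
  | nil => simp [chkLoop]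
  | cons x xs ih =>
    by_cases hxs : x = s
    · subst hxs
      by_cases hxe : x = e
      · subst hxe
        cases flag <;> by_cases hef : x ∈ full <;>
          simp [chkLoop, ih, hef, List.idxOf_cons_self]
      · have hex : ¬ e = x := fun h => hxe h.symm
        by_cases hexs : e ∈ xs
        · cases flag <;> by_cases hef : e ∈ full <;>
            simp [chkLoop, ih, hef, hxe, hex, hexs, List.idxOf_cons_self]
        · have hD : e ∉ xs.drop (xs.idxOf x) := fun h => hexs (List.mem_of_mem_drop h)
          cases flag <;> by_cases hef : e ∈ full <;>
            simp [chkLoop, ih, hef, hxe, hex, hexs, hD, List.idxOf_cons_self]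
    · have hsx : ¬ s = x := fun h => hxs h.symm
      have hidx : (x :: xs).idxOf s = xs.idxOf s + 1 := List.idxOf_cons_ne _ (fun h => hxs h)
      by_cases hxe : x = e
      · subst hxe
        cases flag <;> by_cases hef : x ∈ full <;>
          simp [chkLoop, ih, hef, hxs, hsx, hidx]
      · have hex : ¬ e = x := fun h => hxe h.symm
        cases flag <;> by_cases hef : e ∈ full <;>
          simp [chkLoop, ih, hef, hxs, hsx, hxe, hex, hidx]

-- ===== VERDICT (by name: the statement is the Claim_ definition above) =====
theorem check_contains_spec : Claim_equal_check_contains := by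
  intro l s e _hd
  unfold Spec_check_contains check_contains check_contains_alt
  rw [chkLoop_eq]
  by_cases hs : s ∈ l
  · rw [if_pos hs]
    have hidx := index?_of_mem l s hs
    simp only [hidx, Option.getD_some, PySem.List.slice_from_natCast]
    by_cases he : e ∈ l.drop (l.idxOf s)
    · simp [he, hs, List.mem_of_mem_drop he]
    · simp [he, hs]
  · simp [hs]
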